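-- pv_equiv track=rewrite | github.com/jramaswami/Binary_Search_Python | find_local_peaks.py | solve
-- ===== SOURCE A (Python) =====
-- def solve(nums):
--     if len(nums) < 2:
--         return []
--
--     peaks = []
--
--     # Check index 0
--     if nums[0] > nums[1]:
--         peaks.append(0)
--
--     if len(nums) > 2:
--         for i, _ in enumerate(nums[1:-1], start=1):
--             if nums[i-1] < nums[i] and nums[i] > nums[i+1]:
--                 peaks.append(i)
--
--     # Check last index
--     if nums[-2] < nums[-1]:
--         peaks.append(len(nums)-1)
--
--     return peaks
-- ===== SOURCE B (Python) =====
-- def solve(nums):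
--     n = len(nums)
--     if n < 2:
--         return []
--     # Stage 1: difference-sign list with sentinels: rising[i] = sign(nums[i]-nums[i-1]),
--     # with a rising sentinel before index 0 and a falling sentinel after index n-1.
--     rising = [1] + [(x < y) - (x > y) for x, y in zip(nums, nums[1:])] + [-1]
--     # Stage 2: a peak is exactly a +/- sign change.
--     return [i for i in range(n) if rising[i] > 0 and rising[i + 1] < 0]
-- ===== Notes on version B (the rewrite author's own statement) =====
-- stated objective: alternative
-- what changed: Instead of comparing each element with its neighbours in three separate cases, B first builds a sentinel-padded list of adjacent difference signs ([1] + signs + [-1]) and then selects the indices where the sign changes from positive to negative.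
import Mathlib
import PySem

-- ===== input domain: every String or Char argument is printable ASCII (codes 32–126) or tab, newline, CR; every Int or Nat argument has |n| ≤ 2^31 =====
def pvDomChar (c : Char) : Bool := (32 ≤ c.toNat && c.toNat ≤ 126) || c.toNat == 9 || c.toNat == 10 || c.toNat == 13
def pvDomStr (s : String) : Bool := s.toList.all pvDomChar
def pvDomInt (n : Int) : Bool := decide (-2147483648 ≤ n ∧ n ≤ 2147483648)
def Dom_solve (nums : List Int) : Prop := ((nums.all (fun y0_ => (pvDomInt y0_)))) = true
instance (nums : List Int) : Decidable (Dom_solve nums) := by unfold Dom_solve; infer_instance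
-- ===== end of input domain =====

-- B replaces A's three-case neighbour comparison by a two-stage pipeline: first a
-- sentinel-padded list of difference signs, then a filter for +/- sign changes;
-- objective: alternative decomposition, same cost.


-- ===== PORT A =====
def solve (nums : List Int) : List Int :=
  if nums.length < 2 then [] else
    let peaks : List Int :=
      if PySem.List.pyGetD nums 0 0 > PySem.List.pyGetD nums 1 0 then [0] else []
    let peaks :=
      if nums.length > 2 then
        (PySem.List.enumerate (PySem.List.slice nums (some 1) (some (-1))) 1).foldl
          (fun acc p =>
            if PySem.List.pyGetD nums (p.1 - 1) 0 < PySem.List.pyGetD nums p.1 0 ∧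
               PySem.List.pyGetD nums p.1 0 > PySem.List.pyGetD nums (p.1 + 1) 0
            then acc ++ [p.1] else acc) peaks
      else peaks
    if PySem.List.pyGetD nums (-2) 0 < PySem.List.pyGetD nums (-1) 0 then
      peaks ++ [(nums.length : Int) - 1]
    else peaks

-- ===== PORT B =====
-- (x < y) - (x > y) on Python bools-as-ints
def pvSgn (x y : Int) : Int := (if x < y then 1 else 0) - (if x > y then 1 else 0)

def solve_alt (nums : List Int) : List Int :=
  let n : Int := nums.length
  if n < 2 then [] else
    let rising : List Int :=
      [1] ++ (nums.zip (PySem.List.slice nums (some 1) none)).map (fun p => pvSgn p.1 p.2) ++ [-1]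
    (PySem.List.pyRange 0 n 1).filter (fun i =>
      decide (PySem.List.pyGetD rising i 0 > 0) &&
      decide (PySem.List.pyGetD rising (i + 1) 0 < 0))

-- ===== PRECONDITION & SPEC =====
def Spec_solve (nums : List Int) (out : List Int) : Prop := out = solve_alt nums
instance (nums : List Int) (out : List Int) : Decidable (Spec_solve nums out) := by unfold Spec_solve; infer_instance

-- ===== CLAIM (what is proved, stated in full; the proofs are below) =====
def Claim_equal_solve : Prop := ∀ (nums : List Int), Dom_solve nums → Spec_solve nums (solve nums)

-- ===== LEMMAS AND PROOFS =====

-- proofs-only middle form: the peak predicate written directly on indices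
def bcomp (nums : List Int) : List Int :=
  let n : Int := nums.length
  if n < 2 then [] else
    (PySem.List.pyRange 0 n 1).filter (fun i =>
      (i == 0 || decide (PySem.List.pyGetD nums (i - 1) 0 < PySem.List.pyGetD nums i 0)) &&
      (i == n - 1 || decide (PySem.List.pyGetD nums i 0 > PySem.List.pyGetD nums (i + 1) 0)))

-- Folding over `enumerate xs s` with a function that only reads the index component
-- is folding over the corresponding range of indices.
theorem foldl_enumerate_fst {α β : Type} (F : β → Int → β) :
    ∀ (xs : List α) (s : Int) (init : β),
      (PySem.List.enumerate xs s).foldl (fun acc p => F acc p.1) init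
        = (PySem.List.pyRange s (s + xs.length) 1).foldl F init := by
  intro xs
  induction xs with
  | nil => intro s init; simp [PySem.List.enumerate_nil, PySem.List.pyRange_one_eq_nil]
  | cons x t ih =>
      intro s init
      rw [PySem.List.enumerate_cons, PySem.List.pyRange_one_cons (by simp)]
      simp only [List.foldl_cons]
      rw [ih (s + 1) (F init s)]
      have harg : s + 1 + (t.length : Int) = s + ((x :: t).length : Int) := by
        simp only [List.length_cons]; push_cast; ring
      rw [harg]

theorem solveA_eq_bcomp : ∀ (nums : List Int), solve nums = bcomp nums := by
  intro nums
  by_cases h2 : nums.length < 2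
  · simp [solve, bcomp, h2, show ((nums.length : Int) < 2) by exact_mod_cast h2]
  · rw [not_lt] at h2
    have hn2 : ¬ ((nums.length : Int) < 2) := by exact_mod_cast not_lt.mpr h2
    set N : Int := (nums.length : Int) with hN
    have hN2 : 2 ≤ N := by omega
    have hP : ∀ i ∈ PySem.List.pyRange 1 (N - 1) 1,
        (decide (PySem.List.pyGetD nums (i - 1) 0 < PySem.List.pyGetD nums i 0 ∧
                 PySem.List.pyGetD nums i 0 > PySem.List.pyGetD nums (i + 1) 0))
        = ((i == 0 || decide (PySem.List.pyGetD nums (i - 1) 0 < PySem.List.pyGetD nums i 0)) &&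
           (i == N - 1 || decide (PySem.List.pyGetD nums i 0 > PySem.List.pyGetD nums (i + 1) 0))) := by
      intro i hi
      rw [PySem.List.mem_pyRange_one] at hi
      have h0 : (i == 0) = false := by simp; omega
      have h1 : (i == N - 1) = false := by simp; omega
      rw [h0, h1]
      simp
    have hne : nums ≠ [] := by intro h; rw [h] at h2; simp at h2
    have hslice : ((PySem.List.slice nums (some 1) (some (-1))).length : Int) = N - 2 := by
      rw [PySem.List.length_slice]
      simp [PySem.List.clampIdx, hne]
      omega
    have hmid : ∀ init : List Int,
        (PySem.List.enumerate (PySem.List.slice nums (some 1) (some (-1))) 1).foldl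
          (fun acc p =>
            if PySem.List.pyGetD nums (p.1 - 1) 0 < PySem.List.pyGetD nums p.1 0 ∧
               PySem.List.pyGetD nums p.1 0 > PySem.List.pyGetD nums (p.1 + 1) 0
            then acc ++ [p.1] else acc) init
        = init ++ (PySem.List.pyRange 1 (N - 1) 1).filter
            (fun i => decide (PySem.List.pyGetD nums (i - 1) 0 < PySem.List.pyGetD nums i 0 ∧
                 PySem.List.pyGetD nums i 0 > PySem.List.pyGetD nums (i + 1) 0)) := by
      intro init
      rw [foldl_enumerate_fst (F := fun acc i =>
            if PySem.List.pyGetD nums (i - 1) 0 < PySem.List.pyGetD nums i 0 ∧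
               PySem.List.pyGetD nums i 0 > PySem.List.pyGetD nums (i + 1) 0
            then acc ++ [i] else acc)]
      rw [show (1 : Int) + ((PySem.List.slice nums (some 1) (some (-1))).length : Int) = N - 1 by omega]
      exact PySem.List.foldl_append_ite_eq_filter _ _ _
    have hneg2 : PySem.List.pyGetD nums (-2) 0 = PySem.List.pyGetD nums (N - 2) 0 := by
      have hc : N - 2 = ((nums.length - 2 : Nat) : Int) := by omega
      rw [PySem.List.pyGetD_neg_ofNat nums 2 0 (by omega) (by omega), hc,
          PySem.List.pyGetD_natCast, List.getD_eq_getElem _ _ (by omega)]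
    have hneg1 : PySem.List.pyGetD nums (-1) 0 = PySem.List.pyGetD nums (N - 1) 0 := by
      have hc : N - 1 = ((nums.length - 1 : Nat) : Int) := by omega
      rw [PySem.List.pyGetD_neg_ofNat nums 1 0 (by omega) (by omega), hc,
          PySem.List.pyGetD_natCast, List.getD_eq_getElem _ _ (by omega)]
    have hsplit : PySem.List.pyRange 0 N 1
        = [0] ++ PySem.List.pyRange 1 (N - 1) 1 ++ [N - 1] := by
      have e0 : PySem.List.pyRange 0 1 1 = [0] := by
        rw [PySem.List.pyRange_one_cons (by omega), PySem.List.pyRange_one_eq_nil (by omega)]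
      have e1 : PySem.List.pyRange (N - 1) N 1 = [N - 1] := by
        rw [PySem.List.pyRange_one_cons (by omega), PySem.List.pyRange_one_eq_nil (by omega)]
      rw [PySem.List.pyRange_one_append 0 1 N (by omega) (by omega),
          PySem.List.pyRange_one_append 1 (N - 1) N (by omega) (by omega), e0, e1]
      simp
    simp only [solve, bcomp]
    rw [if_neg (by omega : ¬ nums.length < 2), if_neg hn2, hsplit]
    rw [List.filter_append, List.filter_append, ← List.filter_congr hP]
    have hf0 : List.filter (fun i =>
        (i == 0 || decide (PySem.List.pyGetD nums (i - 1) 0 < PySem.List.pyGetD nums i 0)) &&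
        (i == N - 1 || decide (PySem.List.pyGetD nums i 0 > PySem.List.pyGetD nums (i + 1) 0))) [0]
        = if PySem.List.pyGetD nums 0 0 > PySem.List.pyGetD nums 1 0 then [0] else [] := by
      have h1 : ((0 : Int) == N - 1) = false := by simp; omega
      simp only [List.filter, h1]
      by_cases hc : PySem.List.pyGetD nums 0 0 > PySem.List.pyGetD nums 1 0 <;>
        simp [hc]
    have hflast : List.filter (fun i =>
        (i == 0 || decide (PySem.List.pyGetD nums (i - 1) 0 < PySem.List.pyGetD nums i 0)) &&
        (i == N - 1 || decide (PySem.List.pyGetD nums i 0 > PySem.List.pyGetD nums (i + 1) 0))) [N - 1]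
        = if PySem.List.pyGetD nums (N - 2) 0 < PySem.List.pyGetD nums (N - 1) 0 then [N - 1] else [] := by
      have h0 : ((N - 1 : Int) == 0) = false := by simp; omega
      simp only [List.filter, h0]
      by_cases hc : PySem.List.pyGetD nums (N - 2) 0 < PySem.List.pyGetD nums (N - 1) 0 <;>
        simp [hc, show N - 1 - 1 = N - 2 by ring]
    rw [hf0, hflast, hneg2, hneg1]
    by_cases h3 : nums.length > 2
    · rw [if_pos h3, hmid]
      by_cases hc : PySem.List.pyGetD nums (N - 2) 0 < PySem.List.pyGetD nums (N - 1) 0 <;>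
        (simp [hc]; try omega)
    · have hmid0 : PySem.List.pyRange 1 (N - 1) 1 = [] :=
        PySem.List.pyRange_one_eq_nil (by omega)
      rw [if_neg h3, hmid0]
      by_cases hc : PySem.List.pyGetD nums (N - 2) 0 < PySem.List.pyGetD nums (N - 1) 0 <;>
        (simp [hc]; try omega)

-- characterisation of the sentinel-padded sign list
theorem pvSgn_pos (x y : Int) : (pvSgn x y > 0) ↔ (x < y) := by
  simp [pvSgn]; split_ifs <;> omega

theorem pvSgn_neg (x y : Int) : (pvSgn x y < 0) ↔ (x > y) := by
  simp [pvSgn]; split_ifs <;> omega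

theorem rising_getD (nums : List Int) (k : Nat) (hk : k ≤ nums.length) :
    (([1] : List Int) ++ (nums.zip (PySem.List.slice nums (some 1) none)).map
        (fun p : Int × Int => pvSgn p.1 p.2) ++ [-1]).getD k 0
      = if k = 0 then 1 else if k = nums.length then -1
        else pvSgn (nums.getD (k - 1) 0) (nums.getD k 0) := by
  rw [PySem.List.slice_from_one]
  rcases Nat.eq_zero_or_pos k with h0 | h0
  · subst h0; simp
  · have hz : (nums.zip nums.tail).length = nums.length - 1 := by
      simp only [List.length_zip, List.length_tail]
      omega
    rw [if_neg (by omega)]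
    have hstep : (([1] : List Int) ++ (nums.zip nums.tail).map (fun p : Int × Int => pvSgn p.1 p.2) ++ [-1]).getD k 0
        = ((nums.zip nums.tail).map (fun p : Int × Int => pvSgn p.1 p.2) ++ ([-1] : List Int)).getD (k - 1) 0 := by
      rcases Nat.exists_eq_add_of_le h0 with ⟨m, hm⟩
      subst hm; simp [List.getD, Nat.add_comm 1 m]
    rw [hstep]
    by_cases hkn : k = nums.length
    · rw [if_pos hkn]
      have hlen : (k - 1) = ((nums.zip nums.tail).map (fun p : Int × Int => pvSgn p.1 p.2)).length := by
        simp [hz]; omega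
      simp [hlen]
    · rw [if_neg hkn]
      have hlt : k - 1 < ((nums.zip nums.tail).map (fun p : Int × Int => pvSgn p.1 p.2)).length := by
        simp [hz]; omega
      rw [List.getD_append _ _ _ _ hlt, List.getD_eq_getElem _ _ hlt]
      have hk1 : k - 1 < (nums.zip nums.tail).length := by omega
      have hkl : k < nums.length := by omega
      simp only [List.getElem_map, List.getElem_zip]
      have htail : nums.tail[k - 1]'(by simp [List.length_tail]; omega) = nums[k]'hkl := by
        rw [List.getElem_tail]; congr 1; omega
      rw [htail, List.getD_eq_getElem _ _ (by omega : k - 1 < nums.length),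
          List.getD_eq_getElem _ _ hkl]

theorem alt_eq_bcomp : ∀ (nums : List Int), solve_alt nums = bcomp nums := by
  intro nums
  by_cases h2 : (nums.length : Int) < 2
  · simp [solve_alt, bcomp, h2]
  · simp only [solve_alt, bcomp, if_neg h2]
    apply List.filter_congr
    intro i hi
    rw [PySem.List.mem_pyRange_one] at hi
    obtain ⟨hi0, hiN⟩ := hi
    have hlen : 2 ≤ nums.length := by exact_mod_cast not_lt.mp h2
    have hi' : i = ((i.toNat : Nat) : Int) := by omega
    have hi1' : i + 1 = (((i.toNat + 1 : Nat)) : Int) := by omega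
    have hIlt : i.toNat < nums.length := by omega
    have g1 : PySem.List.pyGetD
        (([1] : List Int) ++ (nums.zip (PySem.List.slice nums (some 1) none)).map (fun p : Int × Int => pvSgn p.1 p.2) ++ [-1]) i 0
        = if i.toNat = 0 then 1 else if i.toNat = nums.length then -1
          else pvSgn (nums.getD (i.toNat - 1) 0) (nums.getD i.toNat 0) := by
      conv_lhs => rw [hi']
      rw [PySem.List.pyGetD_natCast, rising_getD nums i.toNat (by omega)]
    have g2 : PySem.List.pyGetD
        (([1] : List Int) ++ (nums.zip (PySem.List.slice nums (some 1) none)).map (fun p : Int × Int => pvSgn p.1 p.2) ++ [-1]) (i + 1) 0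
        = if i.toNat + 1 = 0 then 1 else if i.toNat + 1 = nums.length then -1
          else pvSgn (nums.getD i.toNat 0) (nums.getD (i.toNat + 1) 0) := by
      conv_lhs => rw [hi1']
      rw [PySem.List.pyGetD_natCast, rising_getD nums (i.toNat + 1) (by omega)]
      simp
    have hA : PySem.List.pyGetD nums i 0 = nums.getD i.toNat 0 := by
      conv_lhs => rw [hi']
      rw [PySem.List.pyGetD_natCast]
    have hA1 : PySem.List.pyGetD nums (i + 1) 0 = nums.getD (i.toNat + 1) 0 := by
      conv_lhs => rw [hi1']
      rw [PySem.List.pyGetD_natCast]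
    rw [g1, g2, hA, hA1]
    by_cases hz : i = 0
    · -- first index: rising[0] = 1; i ≠ N-1 since N ≥ 2
      rw [if_pos (by omega : i.toNat = 0), if_neg (by omega : ¬ i.toNat + 1 = 0),
          if_neg (by omega : ¬ i.toNat + 1 = nums.length)]
      have hb0 : (i == 0) = true := by simp [hz]
      have hbl : (i == (nums.length : Int) - 1) = false := by simp; omega
      rw [hb0, hbl]
      have ht : i.toNat = 0 := by omega
      simp [pvSgn_neg, ht]
    · have hAm1 : PySem.List.pyGetD nums (i - 1) 0 = nums.getD (i.toNat - 1) 0 := by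
        have hc : i - 1 = (((i.toNat - 1 : Nat)) : Int) := by omega
        conv_lhs => rw [hc]
        rw [PySem.List.pyGetD_natCast]
      rw [hAm1, if_neg (by omega : ¬ i.toNat = 0), if_neg (by omega : ¬ i.toNat = nums.length),
          if_neg (by omega : ¬ i.toNat + 1 = 0)]
      have hb0 : (i == 0) = false := by simp [hz]
      rw [hb0]
      by_cases hl : i = (nums.length : Int) - 1
      · rw [if_pos (by omega : i.toNat + 1 = nums.length)]
        have hbl : (i == (nums.length : Int) - 1) = true := by simp [hl]
        rw [hbl]
        simp [pvSgn_pos]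
      · rw [if_neg (by omega : ¬ i.toNat + 1 = nums.length)]
        have hbl : (i == (nums.length : Int) - 1) = false := by simp [hl]
        rw [hbl]
        simp [pvSgn_pos, pvSgn_neg]

-- ===== VERDICT (by name: the statement is the Claim_ definition above) =====
theorem solve_spec : Claim_equal_solve := by
  intro nums _
  unfold Spec_solve
  rw [solveA_eq_bcomp, alt_eq_bcomp]
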